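-- pv_equiv track=rewrite | github.com/mirage-sudo183/shark-tank-simulator | server/sharks.py | update_confidence_from_transcript
-- ===== SOURCE A (Python) =====
-- POSITIVE_MODIFIERS = {
--     'revenue': {'marcus': 15, 'victor': 25, 'elena': 10, 'richard': 5, 'daniel': 15},
--     'patents': {'marcus': 20, 'victor': 10, 'elena': 25, 'richard': 5, 'daniel': 15},
--     'users': {'marcus': 20, 'victor': 15, 'elena': 10, 'richard': 20, 'daniel': 20},
--     'tech': {'marcus': 25, 'victor': 5, 'elena': 0, 'richard': 10, 'daniel': 30},
--     'retail': {'marcus': 5, 'victor': 10, 'elena': 30, 'richard': 10, 'daniel': 5},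
--     'brand': {'marcus': 10, 'victor': 5, 'elena': 15, 'richard': 30, 'daniel': 10},
--     'recurring': {'marcus': 20, 'victor': 20, 'elena': 10, 'richard': 15, 'daniel': 25},
--     'growth': {'marcus': 20, 'victor': 15, 'elena': 15, 'richard': 20, 'daniel': 15},
-- }
--
-- NEGATIVE_MODIFIERS = {
--     'no_revenue': {'marcus': -15, 'victor': -30, 'elena': -20, 'richard': -10, 'daniel': -10},
--     'no_protection': {'marcus': -20, 'victor': -10, 'elena': -25, 'richard': -5, 'daniel': -15},
--     'crowded_market': {'marcus': -10, 'victor': -15, 'elena': -15, 'richard': -10, 'daniel': -20},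
--     'high_valuation': {'marcus': -15, 'victor': -25, 'elena': -20, 'richard': -10, 'daniel': -15},
-- }
--
-- def update_confidence_from_transcript(shark_id, transcript, current_confidence):
--     """Update confidence based on pitch transcript content."""
--     if not transcript:
--         return current_confidence
--
--     # Combine all transcript text
--     text = ' '.join([t.get('text', '') for t in transcript]).lower()
--     delta = 0
--
--     # Positive signals
--     if 'patent' in text or 'patented' in text or 'intellectual property' in text:
--         delta += POSITIVE_MODIFIERS['patents'].get(shark_id, 10) // 2
--
--     if 'million' in text and ('revenue' in text or 'sales' in text):
--         delta += POSITIVE_MODIFIERS['revenue'].get(shark_id, 15)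
--
--     if 'growing' in text or 'growth' in text or 'doubled' in text:
--         delta += POSITIVE_MODIFIERS['growth'].get(shark_id, 10) // 2
--
--     if 'recurring' in text or 'subscription' in text or 'monthly' in text:
--         delta += POSITIVE_MODIFIERS['recurring'].get(shark_id, 10) // 2
--
--     # Negative signals
--     if 'no revenue' in text or "haven't sold" in text or 'pre-revenue' in text:
--         delta += NEGATIVE_MODIFIERS['no_revenue'].get(shark_id, -15) // 2
--
--     if 'no patent' in text or 'not patented' in text:
--         delta += NEGATIVE_MODIFIERS['no_protection'].get(shark_id, -10) // 2
--
--     if 'competitive' in text or 'crowded' in text or 'many competitors' in text: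
--         delta += NEGATIVE_MODIFIERS['crowded_market'].get(shark_id, -10) // 2
--
--     return max(0, min(100, current_confidence + delta))
-- ===== SOURCE B (Python) =====
-- POSITIVE_MODIFIERS = {
--     'revenue': {'marcus': 15, 'victor': 25, 'elena': 10, 'richard': 5, 'daniel': 15},
--     'patents': {'marcus': 20, 'victor': 10, 'elena': 25, 'richard': 5, 'daniel': 15},
--     'users': {'marcus': 20, 'victor': 15, 'elena': 10, 'richard': 20, 'daniel': 20},
--     'tech': {'marcus': 25, 'victor': 5, 'elena': 0, 'richard': 10, 'daniel': 30},
--     'retail': {'marcus': 5, 'victor': 10, 'elena': 30, 'richard': 10, 'daniel': 5},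
--     'brand': {'marcus': 10, 'victor': 5, 'elena': 15, 'richard': 30, 'daniel': 10},
--     'recurring': {'marcus': 20, 'victor': 20, 'elena': 10, 'richard': 15, 'daniel': 25},
--     'growth': {'marcus': 20, 'victor': 15, 'elena': 15, 'richard': 20, 'daniel': 15},
-- }
--
-- NEGATIVE_MODIFIERS = {
--     'no_revenue': {'marcus': -15, 'victor': -30, 'elena': -20, 'richard': -10, 'daniel': -10},
--     'no_protection': {'marcus': -20, 'victor': -10, 'elena': -25, 'richard': -5, 'daniel': -15},
--     'crowded_market': {'marcus': -10, 'victor': -15, 'elena': -15, 'richard': -10, 'daniel': -20},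
--     'high_valuation': {'marcus': -15, 'victor': -25, 'elena': -20, 'richard': -10, 'daniel': -15},
-- }
--
-- # Every phrase the scorer reacts to (all non-empty).
-- PHRASES = [
--     'patent', 'patented', 'intellectual property',
--     'million', 'revenue', 'sales',
--     'growing', 'growth', 'doubled',
--     'recurring', 'subscription', 'monthly',
--     'no revenue', "haven't sold", 'pre-revenue',
--     'no patent', 'not patented',
--     'competitive', 'crowded', 'many competitors',
-- ]
--
-- def update_confidence_from_transcript(shark_id, transcript, current_confidence):
--     """Update confidence based on pitch transcript content.
--
--     Instead of running one substring search per keyword over the text, do a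
--     single left-to-right scan: at every position, record which of the phrases
--     start there (a naive multi-pattern matcher), collecting a hit set; then
--     score from set membership / intersections and clamp.
--     """
--     if not transcript:
--         return current_confidence
--
--     text = ' '.join(t.get('text', '') for t in transcript).lower()
--
--     hits = set()
--     for i in range(len(text)):
--         for p in PHRASES:
--             if p not in hits and text.startswith(p, i):
--                 hits.add(p)
--
--     delta = 0
--     if hits & {'patent', 'patented', 'intellectual property'}:
--         delta += POSITIVE_MODIFIERS['patents'].get(shark_id, 10) // 2
--     if 'million' in hits and hits & {'revenue', 'sales'}:
--         delta += POSITIVE_MODIFIERS['revenue'].get(shark_id, 15)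
--     if hits & {'growing', 'growth', 'doubled'}:
--         delta += POSITIVE_MODIFIERS['growth'].get(shark_id, 10) // 2
--     if hits & {'recurring', 'subscription', 'monthly'}:
--         delta += POSITIVE_MODIFIERS['recurring'].get(shark_id, 10) // 2
--     if hits & {'no revenue', "haven't sold", 'pre-revenue'}:
--         delta += NEGATIVE_MODIFIERS['no_revenue'].get(shark_id, -15) // 2
--     if hits & {'no patent', 'not patented'}:
--         delta += NEGATIVE_MODIFIERS['no_protection'].get(shark_id, -10) // 2
--     if hits & {'competitive', 'crowded', 'many competitors'}:
--         delta += NEGATIVE_MODIFIERS['crowded_market'].get(shark_id, -10) // 2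
--
--     return max(0, min(100, current_confidence + delta))
-- ===== Notes on version B (the rewrite author's own statement) =====
-- stated objective: alternative
-- what changed: A runs an independent substring search over the text for each of the 16 keywords; B makes ONE left-to-right scan of the text, matching all phrases at each position (a naive multi-pattern matcher) into a hit set, and then scores by set membership/intersections before clamping.
import Mathlib
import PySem

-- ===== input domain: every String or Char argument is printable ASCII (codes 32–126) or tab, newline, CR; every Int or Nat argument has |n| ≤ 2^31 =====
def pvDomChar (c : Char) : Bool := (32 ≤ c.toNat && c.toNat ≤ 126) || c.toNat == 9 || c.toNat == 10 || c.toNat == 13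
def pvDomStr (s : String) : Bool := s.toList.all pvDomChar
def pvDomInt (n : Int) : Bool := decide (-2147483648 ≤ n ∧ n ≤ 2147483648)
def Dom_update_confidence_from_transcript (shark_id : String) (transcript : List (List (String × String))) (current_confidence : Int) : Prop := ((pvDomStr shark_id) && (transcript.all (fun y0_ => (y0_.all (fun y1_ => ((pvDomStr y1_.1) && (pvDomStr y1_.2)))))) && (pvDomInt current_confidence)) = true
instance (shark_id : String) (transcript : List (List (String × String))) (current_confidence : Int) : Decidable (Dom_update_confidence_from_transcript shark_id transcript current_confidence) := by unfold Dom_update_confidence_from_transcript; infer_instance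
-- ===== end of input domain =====

-- B replaces A's sixteen independent substring searches by a single left-to-right scan collecting a hit set, then scores from set membership; objective: alternative.


-- Module constants (the inner modifier dicts of POSITIVE_MODIFIERS / NEGATIVE_MODIFIERS; shared by both ports)
def pmRevenue : PySem.Dict String Int := PySem.Dict.ofList [("marcus", 15), ("victor", 25), ("elena", 10), ("richard", 5), ("daniel", 15)]
def pmPatents : PySem.Dict String Int := PySem.Dict.ofList [("marcus", 20), ("victor", 10), ("elena", 25), ("richard", 5), ("daniel", 15)]
def pmRecurring : PySem.Dict String Int := PySem.Dict.ofList [("marcus", 20), ("victor", 20), ("elena", 10), ("richard", 15), ("daniel", 25)]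
def pmGrowth : PySem.Dict String Int := PySem.Dict.ofList [("marcus", 20), ("victor", 15), ("elena", 15), ("richard", 20), ("daniel", 15)]
def nmNoRevenue : PySem.Dict String Int := PySem.Dict.ofList [("marcus", -15), ("victor", -30), ("elena", -20), ("richard", -10), ("daniel", -10)]
def nmNoProtection : PySem.Dict String Int := PySem.Dict.ofList [("marcus", -20), ("victor", -10), ("elena", -25), ("richard", -5), ("daniel", -15)]
def nmCrowdedMarket : PySem.Dict String Int := PySem.Dict.ofList [("marcus", -10), ("victor", -15), ("elena", -15), ("richard", -10), ("daniel", -20)]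

-- ===== PORT A =====
def update_confidence_from_transcript (shark_id : String) (transcript : List (List (String × String))) (current_confidence : Int) : Int :=
  if transcript = [] then current_confidence
  else
    let text := PySem.Str.lower (PySem.Str.join " " (transcript.map (fun t => (PySem.Dict.ofList t).getD "text" "")))
    let delta : Int := 0
    let delta := if PySem.Str.isIn "patent" text || PySem.Str.isIn "patented" text || PySem.Str.isIn "intellectual property" text
                 then delta + PySem.Int.floordiv (pmPatents.getD shark_id 10) 2 else delta
    let delta := if PySem.Str.isIn "million" text && (PySem.Str.isIn "revenue" text || PySem.Str.isIn "sales" text)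
                 then delta + pmRevenue.getD shark_id 15 else delta
    let delta := if PySem.Str.isIn "growing" text || PySem.Str.isIn "growth" text || PySem.Str.isIn "doubled" text
                 then delta + PySem.Int.floordiv (pmGrowth.getD shark_id 10) 2 else delta
    let delta := if PySem.Str.isIn "recurring" text || PySem.Str.isIn "subscription" text || PySem.Str.isIn "monthly" text
                 then delta + PySem.Int.floordiv (pmRecurring.getD shark_id 10) 2 else delta
    let delta := if PySem.Str.isIn "no revenue" text || PySem.Str.isIn "haven't sold" text || PySem.Str.isIn "pre-revenue" text
                 then delta + PySem.Int.floordiv (nmNoRevenue.getD shark_id (-15)) 2 else delta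
    let delta := if PySem.Str.isIn "no patent" text || PySem.Str.isIn "not patented" text
                 then delta + PySem.Int.floordiv (nmNoProtection.getD shark_id (-10)) 2 else delta
    let delta := if PySem.Str.isIn "competitive" text || PySem.Str.isIn "crowded" text || PySem.Str.isIn "many competitors" text
                 then delta + PySem.Int.floordiv (nmCrowdedMarket.getD shark_id (-10)) 2 else delta
    max 0 (min 100 (current_confidence + delta))

-- ===== PORT B =====
-- every phrase the scorer reacts to (all non-empty)
def PHRASES : List String :=
  ["patent", "patented", "intellectual property",
   "million", "revenue", "sales",
   "growing", "growth", "doubled",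
   "recurring", "subscription", "monthly",
   "no revenue", "haven't sold", "pre-revenue",
   "no patent", "not patented",
   "competitive", "crowded", "many competitors"]

-- the single left-to-right scan of Source B: at every position i, record which phrases start there
def pvScanHits (text : String) : PySem.Set String :=
  (PySem.List.pyRange 0 (PySem.Str.len text) 1).foldl
    (fun hits i =>
      PHRASES.foldl
        (fun hits p =>
          if !hits.contains p && PySem.Chars.startswith (PySem.List.slice text.toList (some i) none) p.toList
          then PySem.Set.add hits p else hits)
        hits)
    PySem.Set.empty

def update_confidence_from_transcript_alt (shark_id : String) (transcript : List (List (String × String))) (current_confidence : Int) : Int :=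
  if transcript = [] then current_confidence
  else
    let text := PySem.Str.lower (PySem.Str.join " " (transcript.map (fun t => (PySem.Dict.ofList t).getD "text" "")))
    let hits := pvScanHits text
    let delta : Int := 0
    let delta := if PySem.Set.inter hits (PySem.Set.ofList ["patent", "patented", "intellectual property"]) ≠ []
                 then delta + PySem.Int.floordiv (pmPatents.getD shark_id 10) 2 else delta
    let delta := if "million" ∈ hits ∧ PySem.Set.inter hits (PySem.Set.ofList ["revenue", "sales"]) ≠ []
                 then delta + pmRevenue.getD shark_id 15 else delta
    let delta := if PySem.Set.inter hits (PySem.Set.ofList ["growing", "growth", "doubled"]) ≠ []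
                 then delta + PySem.Int.floordiv (pmGrowth.getD shark_id 10) 2 else delta
    let delta := if PySem.Set.inter hits (PySem.Set.ofList ["recurring", "subscription", "monthly"]) ≠ []
                 then delta + PySem.Int.floordiv (pmRecurring.getD shark_id 10) 2 else delta
    let delta := if PySem.Set.inter hits (PySem.Set.ofList ["no revenue", "haven't sold", "pre-revenue"]) ≠ []
                 then delta + PySem.Int.floordiv (nmNoRevenue.getD shark_id (-15)) 2 else delta
    let delta := if PySem.Set.inter hits (PySem.Set.ofList ["no patent", "not patented"]) ≠ []
                 then delta + PySem.Int.floordiv (nmNoProtection.getD shark_id (-10)) 2 else delta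
    let delta := if PySem.Set.inter hits (PySem.Set.ofList ["competitive", "crowded", "many competitors"]) ≠ []
                 then delta + PySem.Int.floordiv (nmCrowdedMarket.getD shark_id (-10)) 2 else delta
    max 0 (min 100 (current_confidence + delta))

-- ===== PRECONDITION & SPEC =====
def Spec_update_confidence_from_transcript (shark_id : String) (transcript : List (List (String × String))) (current_confidence : Int) (out : Int) : Prop := out = update_confidence_from_transcript_alt shark_id transcript current_confidence
instance (shark_id : String) (transcript : List (List (String × String))) (current_confidence : Int) (out : Int) : Decidable (Spec_update_confidence_from_transcript shark_id transcript current_confidence out) := by unfold Spec_update_confidence_from_transcript; infer_instance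

-- ===== CLAIM (what is proved, stated in full; the proofs are below) =====
def Claim_equal_update_confidence_from_transcript : Prop := ∀ (shark_id : String) (transcript : List (List (String × String))) (current_confidence : Int), Dom_update_confidence_from_transcript shark_id transcript current_confidence → Spec_update_confidence_from_transcript shark_id transcript current_confidence (update_confidence_from_transcript shark_id transcript current_confidence)

-- ===== LEMMAS AND PROOFS =====

-- membership after the inner per-position loop: q got added iff it is a phrase matching at this position (or was already in)
theorem pv_mem_inner (c : String → Bool) (ps : List String) (h : PySem.Set String) (q : String) :
    q ∈ ps.foldl (fun h p => if !h.contains p && c p then PySem.Set.add h p else h) h ↔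
      q ∈ h ∨ (q ∈ ps ∧ c q = true) := by
  induction ps generalizing h with
  | nil => simp
  | cons p ps ih =>
    have hstep : ∀ q, q ∈ (if !h.contains p && c p then PySem.Set.add h p else h) ↔
        q ∈ h ∨ (q = p ∧ c q = true) := by
      intro q
      split
      next hcond =>
        simp only [Bool.and_eq_true, Bool.not_eq_true'] at hcond
        rw [PySem.Set.mem_add]
        constructor
        · rintro (h1 | rfl)
          · exact Or.inl h1
          · exact Or.inr ⟨rfl, hcond.2⟩
        · rintro (h1 | ⟨rfl, _⟩)
          · exact Or.inl h1
          · exact Or.inr rfl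
      next hcond =>
        constructor
        · exact Or.inl
        · rintro (h1 | ⟨rfl, hcq⟩)
          · exact h1
          · by_cases hm : q ∈ h
            · exact hm
            · have hcf : h.contains q = false := by
                cases hc : h.contains q
                · rfl
                · exact absurd ((PySem.Set.contains_iff h q).mp hc) hm
              exact absurd (by rw [hcf, hcq]; rfl) hcond
    simp only [List.foldl_cons, ih, hstep, List.mem_cons]
    tauto

-- membership after the whole scan loop
theorem pv_mem_scan (cond : Int → String → Bool) (ps : List String) (is : List Int)
    (h : PySem.Set String) (q : String) :
    q ∈ is.foldl (fun h i => ps.foldl (fun h p => if !h.contains p && cond i p then PySem.Set.add h p else h) h) h ↔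
      q ∈ h ∨ (q ∈ ps ∧ ∃ i ∈ is, cond i q = true) := by
  induction is generalizing h with
  | nil => simp
  | cons i is ih =>
    simp only [List.foldl_cons, ih, pv_mem_inner, List.mem_cons]
    constructor
    · rintro ((hq | ⟨hps, hc⟩) | ⟨hps, j, hj, hc⟩)
      · exact Or.inl hq
      · exact Or.inr ⟨hps, i, Or.inl rfl, hc⟩
      · exact Or.inr ⟨hps, j, Or.inr hj, hc⟩
    · rintro (hq | ⟨hps, j, (rfl | hj), hc⟩)
      · exact Or.inl (Or.inl hq)
      · exact Or.inl (Or.inr ⟨hps, hc⟩)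
      · exact Or.inr ⟨hps, j, hj, hc⟩

-- a phrase is in the hit set iff it is one of PHRASES and occurs in the text (Python 'p in text')
theorem pv_mem_hits (text : String) (q : String) (hq : q.toList ≠ []) :
    q ∈ pvScanHits text ↔ q ∈ PHRASES ∧ PySem.Chars.isIn q.toList text.toList = true := by
  unfold pvScanHits
  rw [pv_mem_scan]
  simp only [PySem.Set.empty, List.not_mem_nil, false_or]
  constructor
  · rintro ⟨hps, i, hi, hc⟩
    refine ⟨hps, ?_⟩
    rw [PySem.List.mem_pyRange_one] at hi
    rw [PySem.List.slice_from _ hi.1] at hc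
    rw [PySem.Chars.startswith_iff] at hc
    exact (PySem.Chars.exists_prefix_drop_iff_isIn _ _).mp ⟨_, hc⟩
  · rintro ⟨hps, hin⟩
    refine ⟨hps, ?_⟩
    obtain ⟨j, hj⟩ := (PySem.Chars.exists_prefix_drop_iff_isIn _ _).mpr hin
    have hjlt : j < text.toList.length := by
      by_contra hge
      rw [List.drop_eq_nil_of_le (by omega)] at hj
      exact hq (List.prefix_nil.mp hj)
    refine ⟨(j : Int), ?_, ?_⟩
    · rw [PySem.List.mem_pyRange_one, PySem.Str.len_eq]
      constructor
      · exact_mod_cast Nat.zero_le j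
      · exact_mod_cast hjlt
    · rw [PySem.List.slice_from _ (by exact_mod_cast Nat.zero_le j)]
      rw [PySem.Chars.startswith_iff]
      simpa using hj

-- the two else-branches agree for every joined text
theorem pv_body (shark_id : String) (t : String) (cc : Int) :
    (let delta : Int := 0
     let delta := if PySem.Str.isIn "patent" t || PySem.Str.isIn "patented" t || PySem.Str.isIn "intellectual property" t
                  then delta + PySem.Int.floordiv (pmPatents.getD shark_id 10) 2 else delta
     let delta := if PySem.Str.isIn "million" t && (PySem.Str.isIn "revenue" t || PySem.Str.isIn "sales" t)
                  then delta + pmRevenue.getD shark_id 15 else delta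
     let delta := if PySem.Str.isIn "growing" t || PySem.Str.isIn "growth" t || PySem.Str.isIn "doubled" t
                  then delta + PySem.Int.floordiv (pmGrowth.getD shark_id 10) 2 else delta
     let delta := if PySem.Str.isIn "recurring" t || PySem.Str.isIn "subscription" t || PySem.Str.isIn "monthly" t
                  then delta + PySem.Int.floordiv (pmRecurring.getD shark_id 10) 2 else delta
     let delta := if PySem.Str.isIn "no revenue" t || PySem.Str.isIn "haven't sold" t || PySem.Str.isIn "pre-revenue" t
                  then delta + PySem.Int.floordiv (nmNoRevenue.getD shark_id (-15)) 2 else delta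
     let delta := if PySem.Str.isIn "no patent" t || PySem.Str.isIn "not patented" t
                  then delta + PySem.Int.floordiv (nmNoProtection.getD shark_id (-10)) 2 else delta
     let delta := if PySem.Str.isIn "competitive" t || PySem.Str.isIn "crowded" t || PySem.Str.isIn "many competitors" t
                  then delta + PySem.Int.floordiv (nmCrowdedMarket.getD shark_id (-10)) 2 else delta
     max 0 (min 100 (cc + delta))) =
    (let hits := pvScanHits t
     let delta : Int := 0
     let delta := if PySem.Set.inter hits (PySem.Set.ofList ["patent", "patented", "intellectual property"]) ≠ []
                  then delta + PySem.Int.floordiv (pmPatents.getD shark_id 10) 2 else delta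
     let delta := if "million" ∈ hits ∧ PySem.Set.inter hits (PySem.Set.ofList ["revenue", "sales"]) ≠ []
                  then delta + pmRevenue.getD shark_id 15 else delta
     let delta := if PySem.Set.inter hits (PySem.Set.ofList ["growing", "growth", "doubled"]) ≠ []
                  then delta + PySem.Int.floordiv (pmGrowth.getD shark_id 10) 2 else delta
     let delta := if PySem.Set.inter hits (PySem.Set.ofList ["recurring", "subscription", "monthly"]) ≠ []
                  then delta + PySem.Int.floordiv (pmRecurring.getD shark_id 10) 2 else delta
     let delta := if PySem.Set.inter hits (PySem.Set.ofList ["no revenue", "haven't sold", "pre-revenue"]) ≠ []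
                  then delta + PySem.Int.floordiv (nmNoRevenue.getD shark_id (-15)) 2 else delta
     let delta := if PySem.Set.inter hits (PySem.Set.ofList ["no patent", "not patented"]) ≠ []
                  then delta + PySem.Int.floordiv (nmNoProtection.getD shark_id (-10)) 2 else delta
     let delta := if PySem.Set.inter hits (PySem.Set.ofList ["competitive", "crowded", "many competitors"]) ≠ []
                  then delta + PySem.Int.floordiv (nmCrowdedMarket.getD shark_id (-10)) 2 else delta
     max 0 (min 100 (cc + delta))) := by
  have hw : ∀ w : String, w ∈ PHRASES → w.toList ≠ [] →
      (w ∈ pvScanHits t ↔ PySem.Str.isIn w t = true) := by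
    intro w h1 h2
    rw [pv_mem_hits t w h2, PySem.Str.isIn_eq]
    simp [h1]
  have hinter : ∀ L : List String,
      (PySem.Set.inter (pvScanHits t) (PySem.Set.ofList L) ≠ []) ↔ ∃ w ∈ L, w ∈ pvScanHits t := by
    intro L
    constructor
    · intro hne
      obtain ⟨y, hy⟩ := List.exists_mem_of_ne_nil _ hne
      rw [PySem.Set.mem_inter] at hy
      exact ⟨y, (PySem.Set.mem_ofList _ _).mp hy.2, hy.1⟩
    · rintro ⟨w, hwL, hwhs⟩ hnil
      have hmem : w ∈ PySem.Set.inter (pvScanHits t) (PySem.Set.ofList L) :=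
        (PySem.Set.mem_inter _ _ _).mpr ⟨hwhs, (PySem.Set.mem_ofList _ _).mpr hwL⟩
      rw [hnil] at hmem
      exact List.not_mem_nil hmem
  simp only [hinter, List.exists_mem_cons_iff, List.not_mem_nil, false_and, exists_false, or_false,
    hw "patent" (by decide) (by decide), hw "patented" (by decide) (by decide),
    hw "intellectual property" (by decide) (by decide),
    hw "million" (by decide) (by decide), hw "revenue" (by decide) (by decide),
    hw "sales" (by decide) (by decide),
    hw "growing" (by decide) (by decide), hw "growth" (by decide) (by decide),
    hw "doubled" (by decide) (by decide),
    hw "recurring" (by decide) (by decide), hw "subscription" (by decide) (by decide),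
    hw "monthly" (by decide) (by decide),
    hw "no revenue" (by decide) (by decide), hw "haven't sold" (by decide) (by decide),
    hw "pre-revenue" (by decide) (by decide),
    hw "no patent" (by decide) (by decide), hw "not patented" (by decide) (by decide),
    hw "competitive" (by decide) (by decide), hw "crowded" (by decide) (by decide),
    hw "many competitors" (by decide) (by decide),
    Bool.or_eq_true, Bool.and_eq_true, or_assoc]

-- ===== VERDICT (by name: the statement is the Claim_ definition above) =====
theorem update_confidence_from_transcript_spec : Claim_equal_update_confidence_from_transcript := by
  intro shark_id transcript current_confidence _
  unfold Spec_update_confidence_from_transcript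
  unfold update_confidence_from_transcript update_confidence_from_transcript_alt
  by_cases h : transcript = []
  · simp [h]
  · simp only [if_neg h]
    exact pv_body shark_id _ current_confidence
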